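-- pv_equiv track=rewrite | github.com/GKenar/Math-Recognition | layoutpass.py | find_start_symbol
-- ===== SOURCE A (Python) =====
-- def dominance(s1, s2):
--     return False
--
-- def find_start_symbol(symbols):
--     L = symbols.copy()
--     n = len(L)
--     while n > 1:
--         if dominance(L[n - 1], L[n - 2]):
--             del L[n - 2]
--         else:
--             del L[n - 1]
--         n = n - 1
--
--     return L[0]
-- ===== SOURCE B (Python) =====
-- def find_start_symbol(symbols):
--     # dominance is constantly False, so the loop always drops the last element;
--     # the survivor is simply the first element (IndexError on [] as in A).
--     return symbols[0]
-- ===== Notes on version B (the rewrite author's own statement) =====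
-- stated objective: simpler
-- what changed: Since dominance always returns False, A's while-loop always deletes the last element; B replaces the O(n^2) shrinking loop with the closed form symbols[0].
import Mathlib
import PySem

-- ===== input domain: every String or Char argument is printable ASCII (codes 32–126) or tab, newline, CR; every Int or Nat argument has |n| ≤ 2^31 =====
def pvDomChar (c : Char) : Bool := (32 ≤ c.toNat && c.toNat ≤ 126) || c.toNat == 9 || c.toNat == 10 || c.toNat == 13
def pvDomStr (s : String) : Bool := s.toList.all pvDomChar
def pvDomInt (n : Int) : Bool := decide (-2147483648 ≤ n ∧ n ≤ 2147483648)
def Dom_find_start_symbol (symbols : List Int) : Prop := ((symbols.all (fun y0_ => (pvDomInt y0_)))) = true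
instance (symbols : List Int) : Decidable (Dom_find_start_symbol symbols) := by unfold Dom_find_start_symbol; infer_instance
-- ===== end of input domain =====

-- B replaces A's constantly-False dominance loop by the closed form symbols[0] (same IndexError on []).


-- ===== PORT A =====
def dominanceA (_s1 _s2 : Int) : Bool := false

-- the while-loop: state (L, n); inside Pre_ the indices n-1, n-2 are valid (n = L.length), getD 0 is never taken
def find_start_symbol_loop (L : List Int) (n : Nat) : List Int :=
  if n > 1 then
    if dominanceA ((PySem.List.pyGet? L ((n : Int) - 1)).getD 0)
                  ((PySem.List.pyGet? L ((n : Int) - 2)).getD 0) then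
      find_start_symbol_loop (L.eraseIdx (n - 2)) (n - 1)
    else
      find_start_symbol_loop (L.eraseIdx (n - 1)) (n - 1)
  else L
termination_by n

def find_start_symbol (symbols : List Int) : Int :=
  -- L[0] raises on []; Pre_ excludes the empty list, getD 0 is never taken inside Pre_
  (PySem.List.pyGet? (find_start_symbol_loop symbols symbols.length) 0).getD 0

-- ===== PORT B =====
def find_start_symbol_alt (symbols : List Int) : Int :=
  (PySem.List.pyGet? symbols 0).getD 0

-- ===== PRECONDITION & SPEC =====
-- A (and B) raise IndexError on the empty list.
def Pre_find_start_symbol (symbols : List Int) : Prop := symbols ≠ []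
instance (symbols : List Int) : Decidable (Pre_find_start_symbol symbols) := by unfold Pre_find_start_symbol; infer_instance
def pvWitness_find_start_symbol : List Int := [3, 1, 2]

def Spec_find_start_symbol (symbols : List Int) (out : Int) : Prop := out = find_start_symbol_alt symbols
instance (symbols : List Int) (out : Int) : Decidable (Spec_find_start_symbol symbols out) := by unfold Spec_find_start_symbol; infer_instance

-- ===== CLAIM (what is proved, stated in full; the proofs are below) =====
def Claim_equal_find_start_symbol : Prop := ∀ (symbols : List Int), Dom_find_start_symbol symbols → Pre_find_start_symbol symbols → Spec_find_start_symbol symbols (find_start_symbol symbols)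

-- ===== LEMMAS AND PROOFS =====

-- the loop, started with n = L.length, reduces L to its first element (or leaves [] alone)
theorem find_start_symbol_loop_take (n : Nat) : ∀ (L : List Int), L.length = n →
    find_start_symbol_loop L n = L.take 1 := by
  induction n with
  | zero =>
    intro L h
    simp [find_start_symbol_loop, List.length_eq_zero_iff.mp h]
  | succ m ih =>
    intro L h
    by_cases hm : m = 0
    · subst hm
      rw [find_start_symbol_loop]
      simp only [gt_iff_lt]
      rw [if_neg (by omega)]
      match L, h with
      | [a], _ => rfl
    · rw [find_start_symbol_loop]
      simp only [gt_iff_lt]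
      rw [if_pos (by omega)]
      simp only [dominanceA, if_neg (Bool.false_ne_true)]
      have hlen : (L.eraseIdx (m + 1 - 1)).length = m := by
        rw [List.length_eraseIdx_of_lt (by omega)]; omega
      rw [show m + 1 - 1 = m from rfl] at hlen ⊢
      rw [ih _ hlen]
      obtain ⟨k, rfl⟩ := Nat.exists_eq_succ_of_ne_zero hm
      match L, h with
      | a :: tail, _ => simp [List.eraseIdx]

theorem find_start_symbol_spec : Claim_equal_find_start_symbol := by
  intro symbols _ hpre
  unfold Spec_find_start_symbol find_start_symbol find_start_symbol_alt
  rw [find_start_symbol_loop_take symbols.length symbols rfl]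
  match symbols, hpre with
  | a :: rest, _ => simp [PySem.List.pyGet?, PySem.List.pyIdx?]
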